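-- pv_equiv track=rewrite | github.com/AvantiB/NormalizationAgent | vectorstore/snomed_builder.py | compute_depth_map
-- ===== SOURCE A (Python) =====
-- def compute_depth_map(parent_map: dict) -> dict:
--     """
--     Compute depth for each concept based on parent_map.
--     """
--     depth_map = {}
--
--     def depth(cid):
--         d = 0
--         while cid in parent_map:
--             cid = parent_map[cid]
--             d += 1
--         return d
--
--     for cid in parent_map.keys():
--         depth_map[cid] = depth(cid)
--
--     return depth_map
-- ===== SOURCE B (Python) =====
-- def compute_depth_map(parent_map: dict) -> dict:
--     """
--     Compute depth for each concept based on parent_map.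
--     Memoized: walk up the parent chain only until a node whose depth is
--     already cached (or a root), then unwind the walked path assigning
--     depths; each concept's depth is computed once.
--     """
--     cache = {}
--
--     def depth(cid):
--         path = []
--         while cid not in cache and cid in parent_map:
--             path.append(cid)
--             cid = parent_map[cid]
--         d = cache.get(cid, 0)
--         while path:
--             d += 1
--             cache[path.pop()] = d
--         return d
--
--     return {cid: depth(cid) for cid in parent_map}
-- ===== Notes on version B (the rewrite author's own statement) =====
-- stated objective: alternative
-- what changed: A re-walks the whole parent chain from scratch for every key; B keeps a depth cache, walking up only until the first already-cached node or a root and then unwinding the walked path assigning depths, so each node's depth is computed once.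
import Mathlib
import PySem

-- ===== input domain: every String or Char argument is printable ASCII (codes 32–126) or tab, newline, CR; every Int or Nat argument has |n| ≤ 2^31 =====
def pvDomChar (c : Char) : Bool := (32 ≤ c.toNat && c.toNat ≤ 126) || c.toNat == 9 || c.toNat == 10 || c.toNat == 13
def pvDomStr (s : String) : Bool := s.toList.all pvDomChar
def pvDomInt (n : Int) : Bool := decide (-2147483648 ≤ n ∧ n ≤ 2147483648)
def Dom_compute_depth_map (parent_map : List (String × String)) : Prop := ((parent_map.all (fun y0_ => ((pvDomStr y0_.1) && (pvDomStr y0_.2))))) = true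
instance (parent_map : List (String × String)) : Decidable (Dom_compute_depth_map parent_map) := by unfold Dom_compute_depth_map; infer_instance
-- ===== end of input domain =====

-- B replaces A's per-key full chain walk by a depth cache: walk up only to the
-- first cached node or root, then unwind the path assigning depths (alternative
-- algorithm; each node's depth is computed once).

-- ===== PORT A =====
-- A's inner `depth` while-loop; the fuel argument only makes the recursion
-- total in Lean: under Pre_ (acyclic chains) fuel parent_map.length + 1 is
-- never exhausted, so this is exactly A's loop.
def pvDepthLoopA (D : PySem.Dict String String) : Nat → String → Int → Int
  | 0, _, acc => acc
  | fuel+1, cid, acc =>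
    match D.get? cid with
    | some p => pvDepthLoopA D fuel p (acc + 1)
    | none => acc

def compute_depth_map (parent_map : List (String × String)) : List (String × Int) :=
  let D := PySem.Dict.ofList parent_map
  let depth_map := D.keys.foldl
    (fun dm cid => dm.insert cid (pvDepthLoopA D (parent_map.length + 1) cid 0))
    PySem.Dict.empty
  depth_map.items

-- ===== PORT B =====
-- B's first while-loop: walk up until a cached node or a root, accumulating
-- the visited path (fuel = totality scaffolding, as in port A).
def pvWalk (D : PySem.Dict String String) (cache : PySem.Dict String Int) :
    Nat → String → List String → (List String × String)
  | 0, cid, path => (path, cid)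
  | fuel+1, cid, path =>
    match cache.get? cid with
    | some _ => (path, cid)
    | none =>
      match D.get? cid with
      | some p => pvWalk D cache fuel p (path ++ [cid])
      | none => (path, cid)

-- B's second while-loop (`while path: d += 1; cache[path.pop()] = d`);
-- called on path.reverse since Python pops from the END of path.
def pvUnwind : List String → Int → PySem.Dict String Int → (Int × PySem.Dict String Int)
  | [], d, cache => (d, cache)
  | k :: ks, d, cache => pvUnwind ks (d + 1) (cache.insert k (d + 1))

def compute_depth_map_alt (parent_map : List (String × String)) : List (String × Int) :=
  let D := PySem.Dict.ofList parent_map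
  let st := D.keys.foldl
    (fun (st : PySem.Dict String Int × PySem.Dict String Int) cid =>
      let w := pvWalk D st.2 (parent_map.length + 1) cid []
      let r := pvUnwind w.1.reverse (st.2.getD w.2 0) st.2
      (st.1.insert cid r.1, r.2))
    (PySem.Dict.empty, PySem.Dict.empty)
  st.1.items

-- ===== PRECONDITION & SPEC =====
-- one parent-lookup step (identity outside the key set)
def pvStep (D : PySem.Dict String String) (k : String) : String :=
  match D.get? k with
  | some p => p
  | none => k

def pvStepN (D : PySem.Dict String String) : Nat → String → String
  | 0, k => k
  | n+1, k => pvStepN D n (pvStep D k)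

-- Pre_ = the parent chains are acyclic: from every key, n parent steps leave
-- the key set (n = size bound). On a cyclic chain Python A's while-loop never
-- terminates (A diverges, returns nothing), so those inputs are excluded.
def Pre_compute_depth_map (parent_map : List (String × String)) : Prop :=
  ∀ k ∈ (PySem.Dict.ofList parent_map).keys,
    (PySem.Dict.ofList parent_map).get? (pvStepN (PySem.Dict.ofList parent_map) parent_map.length k) = none

instance (parent_map : List (String × String)) : Decidable (Pre_compute_depth_map parent_map) := by
  unfold Pre_compute_depth_map; infer_instance

def pvWitness_compute_depth_map : (List (String × String)) := ([("a", "b"), ("b", "c")])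

def Spec_compute_depth_map (parent_map : List (String × String)) (out : List (String × Int)) : Prop := out = compute_depth_map_alt parent_map
instance (parent_map : List (String × String)) (out : List (String × Int)) : Decidable (Spec_compute_depth_map parent_map out) := by unfold Spec_compute_depth_map; infer_instance

-- ===== CLAIM (what is proved, stated in full; the proofs are below) =====
def Claim_equal_compute_depth_map : Prop := ∀ (parent_map : List (String × String)), Dom_compute_depth_map parent_map → Pre_compute_depth_map parent_map → Spec_compute_depth_map parent_map (compute_depth_map parent_map)

-- ===== LEMMAS AND PROOFS =====

-- the mathematical depth function (fuel-indexed)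
def pvDep (D : PySem.Dict String String) : Nat → String → Int
  | 0, _ => 0
  | fuel+1, cid =>
    match D.get? cid with
    | some p => 1 + pvDep D fuel p
    | none => 0

lemma pvDepthLoopA_eq (D : PySem.Dict String String) :
    ∀ (fuel : Nat) (cid : String) (acc : Int),
      pvDepthLoopA D fuel cid acc = acc + pvDep D fuel cid := by
  intro fuel
  induction fuel with
  | zero => intro cid acc; simp [pvDepthLoopA, pvDep]
  | succ f ih =>
    intro cid acc
    cases h : D.get? cid with
    | some p => simp [pvDepthLoopA, pvDep, h, ih]; ring
    | none => simp [pvDepthLoopA, pvDep, h]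

lemma pvDep_congr (D : PySem.Dict String String) :
    ∀ (j : Nat) (cid : String) (f1 f2 : Nat),
      D.get? (pvStepN D j cid) = none → j ≤ f1 → j ≤ f2 →
      pvDep D f1 cid = pvDep D f2 cid := by
  intro j
  induction j with
  | zero =>
    intro cid f1 f2 h _ _
    simp [pvStepN] at h
    cases f1 <;> cases f2 <;> simp [pvDep, h]
  | succ j ih =>
    intro cid f1 f2 h h1 h2
    cases hc : D.get? cid with
    | none => cases f1 <;> cases f2 <;> simp [pvDep, hc]
    | some p =>
      obtain ⟨a, rfl⟩ : ∃ a, f1 = a + 1 := ⟨f1 - 1, by omega⟩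
      obtain ⟨b, rfl⟩ : ∃ b, f2 = b + 1 := ⟨f2 - 1, by omega⟩
      have hstep : pvStep D cid = p := by simp [pvStep, hc]
      have h' : D.get? (pvStepN D j p) = none := by
        simpa [pvStepN, hstep] using h
      simp [pvDep, hc, ih p a b h' (by omega) (by omega)]

-- cache invariant: every cached value is the true depth
def pvGood (D : PySem.Dict String String) (N : Nat) (cache : PySem.Dict String Int) : Prop :=
  ∀ k v, cache.get? k = some v → v = pvDep D (N+1) k

lemma pvWalk_append (D : PySem.Dict String String) (cache : PySem.Dict String Int) :
    ∀ (fuel : Nat) (cid : String) (path : List String),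
      pvWalk D cache fuel cid path =
        (path ++ (pvWalk D cache fuel cid []).1, (pvWalk D cache fuel cid []).2) := by
  intro fuel
  induction fuel with
  | zero => intro cid path; simp [pvWalk]
  | succ f ih =>
    intro cid path
    cases hcc : cache.get? cid with
    | some v => simp [pvWalk, hcc]
    | none =>
      cases hc : D.get? cid with
      | some p =>
        simp only [pvWalk, hcc, hc, List.nil_append]
        rw [ih p (path ++ [cid]), ih p [cid]]
        simp
      | none => simp [pvWalk, hcc, hc]

lemma pvUnwind_append :
    ∀ (xs : List String) (k : String) (d : Int) (c : PySem.Dict String Int),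
      pvUnwind (xs ++ [k]) d c =
        ((pvUnwind xs d c).1 + 1, (pvUnwind xs d c).2.insert k ((pvUnwind xs d c).1 + 1)) := by
  intro xs
  induction xs with
  | nil => intro k d c; simp [pvUnwind]
  | cons x xs ih => intro k d c; simp [pvUnwind, ih]

-- the heart: walk-then-unwind returns the true depth and keeps the cache good
lemma pvWalk_unwind (D : PySem.Dict String String) (N : Nat) :
    ∀ (fuel : Nat) (cid : String) (cache : PySem.Dict String Int),
      pvGood D N cache →
      (∃ j, j < fuel ∧ j ≤ N ∧ D.get? (pvStepN D j cid) = none) →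
      (pvUnwind ((pvWalk D cache fuel cid []).1).reverse
          (cache.getD (pvWalk D cache fuel cid []).2 0) cache).1 = pvDep D (N+1) cid ∧
      pvGood D N (pvUnwind ((pvWalk D cache fuel cid []).1).reverse
          (cache.getD (pvWalk D cache fuel cid []).2 0) cache).2 := by
  intro fuel
  induction fuel with
  | zero => intro cid cache _ hesc; obtain ⟨j, hj, -, -⟩ := hesc; omega
  | succ f ih =>
    intro cid cache hgood hesc
    cases hcc : cache.get? cid with
    | some v =>
      have hv := hgood cid v hcc
      have hg : cache.getD cid 0 = v := PySem.Dict.getD_of_get?_eq_some cache 0 hcc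
      simp only [pvWalk, hcc, pvUnwind, List.reverse_nil]
      rw [hg, hv]
      exact ⟨rfl, hgood⟩
    | none =>
      cases hc : D.get? cid with
      | none =>
        have hd : pvDep D (N+1) cid = 0 := by simp [pvDep, hc]
        have hg : cache.getD cid 0 = 0 := PySem.Dict.getD_of_get?_eq_none cache 0 hcc
        simp only [pvWalk, hcc, hc, pvUnwind, List.reverse_nil]
        rw [hg, hd]
        exact ⟨rfl, hgood⟩
      | some p =>
        obtain ⟨j, hjf, hjN, hjesc⟩ := hesc
        have hj0 : j ≠ 0 := by
          intro h; subst h; simp [pvStepN] at hjesc; rw [hc] at hjesc; simp at hjesc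
        obtain ⟨j', rfl⟩ : ∃ j', j = j' + 1 := ⟨j - 1, by omega⟩
        have hstep : pvStep D cid = p := by simp [pvStep, hc]
        have hesc' : D.get? (pvStepN D j' p) = none := by
          simpa [pvStepN, hstep] using hjesc
        have ihp := ih p cache hgood ⟨j', by omega, by omega, hesc'⟩
        have hdep : pvDep D (N+1) cid = pvDep D (N+1) p + 1 := by
          have : pvDep D N p = pvDep D (N+1) p :=
            pvDep_congr D j' p N (N+1) hesc' (by omega) (by omega)
          simp [pvDep, hc, this]; ring
        simp only [pvWalk, hcc, hc, List.nil_append]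
        rw [pvWalk_append D cache f p [cid]]
        simp only [List.reverse_append, List.reverse_cons, List.reverse_nil, List.nil_append]
        rw [pvUnwind_append]
        constructor
        · simp only [ihp.1, hdep]
        · intro k v hk
          rw [PySem.Dict.get?_insert] at hk
          by_cases hkc : k = cid
          · subst hkc
            simp at hk
            rw [← hk, hdep, ihp.1]
          · simp [hkc] at hk
            exact ihp.2 k v hk

-- the two key-loops build equal depth dicts
lemma pvFold_eq (D : PySem.Dict String String) (N : Nat) :
    ∀ (l : List String),
      (∀ k ∈ l, D.get? (pvStepN D N k) = none) →
      ∀ (dm : PySem.Dict String Int) (cache : PySem.Dict String Int),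
        pvGood D N cache →
        (l.foldl (fun (st : PySem.Dict String Int × PySem.Dict String Int) cid =>
            let w := pvWalk D st.2 (N + 1) cid []
            let r := pvUnwind w.1.reverse (st.2.getD w.2 0) st.2
            (st.1.insert cid r.1, r.2)) (dm, cache)).1
        = l.foldl (fun dm cid => dm.insert cid (pvDepthLoopA D (N + 1) cid 0)) dm := by
  intro l
  induction l with
  | nil => intro _ dm cache _; rfl
  | cons cid l ih =>
    intro hesc dm cache hgood
    have h := pvWalk_unwind D N (N+1) cid cache hgood
      ⟨N, by omega, le_refl N, hesc cid (List.mem_cons_self)⟩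
    have hA : pvDepthLoopA D (N+1) cid 0 = pvDep D (N+1) cid := by
      rw [pvDepthLoopA_eq]; ring
    simp only [List.foldl_cons]
    rw [ih (fun k hk => hesc k (List.mem_cons_of_mem _ hk)) _ _ h.2, h.1, hA]

theorem compute_depth_map_ab (parent_map : List (String × String))
    (hpre : Pre_compute_depth_map parent_map) :
    compute_depth_map parent_map = compute_depth_map_alt parent_map := by
  show (((PySem.Dict.ofList parent_map).keys.foldl
      (fun dm cid => dm.insert cid (pvDepthLoopA (PySem.Dict.ofList parent_map) (parent_map.length + 1) cid 0))
      PySem.Dict.empty).items)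
    = (((PySem.Dict.ofList parent_map).keys.foldl
      (fun (st : PySem.Dict String Int × PySem.Dict String Int) cid =>
        let w := pvWalk (PySem.Dict.ofList parent_map) st.2 (parent_map.length + 1) cid []
        let r := pvUnwind w.1.reverse (st.2.getD w.2 0) st.2
        (st.1.insert cid r.1, r.2)) (PySem.Dict.empty, PySem.Dict.empty)).1.items)
  have hgood : pvGood (PySem.Dict.ofList parent_map) parent_map.length PySem.Dict.empty := by
    intro k v hk; simp [PySem.Dict.get?_empty] at hk
  rw [pvFold_eq (PySem.Dict.ofList parent_map) parent_map.length
      (PySem.Dict.ofList parent_map).keys hpre PySem.Dict.empty PySem.Dict.empty hgood]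

-- ===== VERDICT (by name: the statement is the Claim_ definition above) =====
theorem compute_depth_map_spec : Claim_equal_compute_depth_map := by
  intro parent_map _ hpre
  unfold Spec_compute_depth_map
  exact compute_depth_map_ab parent_map hpre
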